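-- pv_equiv track=rewrite | github.com/sullygpt-ui/keyword-intelligence | scrapers/sec_edgar.py | extract_mda_section
-- ===== SOURCE A (Python) =====
-- def extract_mda_section(text: str) -> str:
--     """Extract Management Discussion & Analysis section"""
--     if not text:
--         return ""
--
--     text_lower = text.lower()
--
--     # Common MD&A section markers
--     start_markers = [
--         "management's discussion and analysis",
--         "management discussion and analysis",
--         "item 7. management",
--         "item 7 management",
--         "md&a",
--     ]
--
--     end_markers = [
--         "item 8",
--         "item 7a",
--         "quantitative and qualitative disclosures",
--         "financial statements and supplementary data",
--     ]
--
--     # Find start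
--     start_pos = len(text)
--     for marker in start_markers:
--         pos = text_lower.find(marker)
--         if pos != -1 and pos < start_pos:
--             start_pos = pos
--
--     if start_pos == len(text):
--         # No MD&A found, return a portion of the text
--         return text[10000:50000] if len(text) > 50000 else text
--
--     # Find end
--     end_pos = len(text)
--     search_start = start_pos + 1000  # Skip past the heading
--     for marker in end_markers:
--         pos = text_lower.find(marker, search_start)
--         if pos != -1 and pos < end_pos:
--             end_pos = pos
--
--     return text[start_pos:end_pos]
-- ===== SOURCE B (Python) =====
-- def extract_mda_section(text: str) -> str:
--     """Extract Management Discussion & Analysis section"""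
--     if not text:
--         return ""
--
--     text_lower = text.lower()
--
--     start_markers = (
--         "management's discussion and analysis",
--         "management discussion and analysis",
--         "item 7. management",
--         "item 7 management",
--         "md&a",
--     )
--
--     end_markers = (
--         "item 8",
--         "item 7a",
--         "quantitative and qualitative disclosures",
--         "financial statements and supplementary data",
--     )
--
--     n = len(text)
--
--     # single left-to-right scan: first position where any start marker begins
--     start_pos = next(
--         (i for i in range(n) if text_lower.startswith(start_markers, i)), None
--     )
--     if start_pos is None:
--         # No MD&A found, return a portion of the text
--         return text[10000:50000] if n > 50000 else text
--
--     # single scan past the heading: first position where any end marker begins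
--     search_start = start_pos + 1000
--     end_pos = next(
--         (i for i in range(search_start, n) if text_lower.startswith(end_markers, i)), n
--     )
--
--     return text[start_pos:end_pos]
-- ===== Notes on version B (the rewrite author's own statement) =====
-- stated objective: alternative
-- what changed: A runs str.find once per marker and keeps a running minimum; B does a single left-to-right positional scan (next over a range generator with str.startswith(markers_tuple, i)) that stops at the first position where any marker begins, for both the start- and the end-marker search.
import Mathlib
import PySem

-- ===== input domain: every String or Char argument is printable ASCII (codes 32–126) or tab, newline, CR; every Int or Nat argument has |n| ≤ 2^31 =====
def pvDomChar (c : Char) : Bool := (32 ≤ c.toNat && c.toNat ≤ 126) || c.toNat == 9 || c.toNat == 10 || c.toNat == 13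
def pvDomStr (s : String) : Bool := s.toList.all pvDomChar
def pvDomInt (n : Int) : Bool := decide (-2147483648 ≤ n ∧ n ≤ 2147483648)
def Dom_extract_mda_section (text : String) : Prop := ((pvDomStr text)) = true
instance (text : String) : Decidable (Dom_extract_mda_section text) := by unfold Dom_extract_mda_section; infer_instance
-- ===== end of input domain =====

-- B replaces A's per-marker `str.find` passes + running minimum by a single left-to-right
-- positional scan that stops at the first position where any marker begins (objective: alternative).

-- shared marker data (module constants in both Pythons)
def pvStartMarkers : List (List Char) :=
  [ "management's discussion and analysis".toList,
    "management discussion and analysis".toList,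
    "item 7. management".toList,
    "item 7 management".toList,
    "md&a".toList ]

def pvEndMarkers : List (List Char) :=
  [ "item 8".toList,
    "item 7a".toList,
    "quantitative and qualitative disclosures".toList,
    "financial statements and supplementary data".toList ]

-- ===== PORT A =====
def extract_mda_section (text : String) : String :=
  -- if not text: return ""
  if text.toList = [] then ""
  -- start_pos = running minimum of text_lower.find(marker) over the start markers, init len(text)
  else if
    pvStartMarkers.foldl
      (fun sp m =>
        let pos := PySem.Chars.find (PySem.Chars.lower text.toList) m
        if pos ≠ -1 ∧ pos < sp then pos else sp) (text.toList.length : Int)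
      = (text.toList.length : Int)
  then
    -- no MD&A found: text[10000:50000] if len(text) > 50000 else text
    if (text.toList.length : Int) > 50000 then
      String.ofList (PySem.List.slice text.toList (some 10000) (some 50000))
    else text
  else
    -- end_pos = running minimum of text_lower.find(marker, start_pos + 1000), init len(text)
    String.ofList (PySem.List.slice text.toList
      (some (pvStartMarkers.foldl
        (fun sp m =>
          let pos := PySem.Chars.find (PySem.Chars.lower text.toList) m
          if pos ≠ -1 ∧ pos < sp then pos else sp) (text.toList.length : Int)))
      (some (pvEndMarkers.foldl
        (fun ep m =>
          let pos := PySem.Chars.findFrom (PySem.Chars.lower text.toList) m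
            (pvStartMarkers.foldl
              (fun sp m =>
                let pos := PySem.Chars.find (PySem.Chars.lower text.toList) m
                if pos ≠ -1 ∧ pos < sp then pos else sp) (text.toList.length : Int) + 1000)
          if pos ≠ -1 ∧ pos < ep then pos else ep) (text.toList.length : Int))))

-- ===== PORT B =====
-- text_lower.startswith(markers, i)
def pvAnyAt (tl : List Char) (markers : List (List Char)) (i : Nat) : Bool :=
  markers.any (fun m => PySem.Chars.startswith (tl.drop i) m)

-- next((i for i in range(lo, lo+fuel) if pred i), None)
def pvScan (tl : List Char) (markers : List (List Char)) : Nat → Nat → Option Nat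
  | _, 0 => none
  | i, fuel+1 => if pvAnyAt tl markers i then some i else pvScan tl markers (i+1) fuel

def extract_mda_section_alt (text : String) : String :=
  if text.toList = [] then ""
  else
    -- first position at which any start marker begins, scanning range(len(text))
    match pvScan (PySem.Chars.lower text.toList) pvStartMarkers 0 text.toList.length with
    | none =>
      if (text.toList.length : Int) > 50000 then
        String.ofList (PySem.List.slice text.toList (some 10000) (some 50000))
      else text
    | some sp =>
      -- first position ≥ sp + 1000 at which any end marker begins, default len(text)
      String.ofList (PySem.List.slice text.toList (some (sp : Int))
        (some (((pvScan (PySem.Chars.lower text.toList) pvEndMarkers (sp + 1000)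
                  (text.toList.length - (sp + 1000))).getD text.toList.length : Nat) : Int)))

-- ===== PRECONDITION & SPEC =====
def Spec_extract_mda_section (text : String) (out : String) : Prop := out = extract_mda_section_alt text
instance (text : String) (out : String) : Decidable (Spec_extract_mda_section text out) := by unfold Spec_extract_mda_section; infer_instance

-- ===== CLAIM (what is proved, stated in full; the proofs are below) =====
def Claim_equal_extract_mda_section : Prop := ∀ (text : String), Dom_extract_mda_section text → Spec_extract_mda_section text (extract_mda_section text)

-- ===== LEMMAS AND PROOFS =====

-- a prefix at some drop position is an infix
theorem pvPrefixDropInfix (s m : List Char) (j : Nat) (h : m <+: s.drop j) : m <:+: s :=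
  (PySem.Chars.isIn_iff_infix m s).mp ((PySem.Chars.exists_prefix_drop_iff_isIn m s).mp ⟨j, h⟩)

-- the running-minimum fold of A, characterised
theorem pvFoldMinSpec (f : List Char → Int) (ms : List (List Char)) :
    ∀ acc : Int,
      (ms.foldl (fun sp m => let pos := f m; if pos ≠ -1 ∧ pos < sp then pos else sp) acc) ≤ acc ∧
      ((ms.foldl (fun sp m => let pos := f m; if pos ≠ -1 ∧ pos < sp then pos else sp) acc) = acc ∨
        ∃ m ∈ ms, (ms.foldl (fun sp m => let pos := f m; if pos ≠ -1 ∧ pos < sp then pos else sp) acc) = f m ∧ f m ≠ -1) ∧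
      (∀ m ∈ ms, f m ≠ -1 →
        (ms.foldl (fun sp m => let pos := f m; if pos ≠ -1 ∧ pos < sp then pos else sp) acc) ≤ f m) := by
  induction ms with
  | nil => intro acc; simp
  | cons m ms ih =>
    intro acc
    simp only [List.foldl_cons]
    by_cases h : f m ≠ -1 ∧ f m < acc
    · rw [if_pos h]
      obtain ⟨h1, h2, h3⟩ := ih (f m)
      refine ⟨le_of_lt (lt_of_le_of_lt h1 h.2), ?_, ?_⟩
      · rcases h2 with h2 | ⟨m', hm', hh⟩
        · exact Or.inr ⟨m, List.mem_cons_self, h2, h.1⟩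
        · exact Or.inr ⟨m', List.mem_cons_of_mem _ hm', hh⟩
      · intro m' hm' hne
        rcases List.mem_cons.mp hm' with rfl | hm'
        · exact h1
        · exact h3 m' hm' hne
    · rw [if_neg h]
      obtain ⟨h1, h2, h3⟩ := ih acc
      refine ⟨h1, ?_, ?_⟩
      · rcases h2 with h2 | ⟨m', hm', hh⟩
        · exact Or.inl h2
        · exact Or.inr ⟨m', List.mem_cons_of_mem _ hm', hh⟩
      intro m' hm' hne
      rcases List.mem_cons.mp hm' with rfl | hm'
      · rcases not_and_or.mp h with hc | hc
        · exact absurd hne (by simpa using hc)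
        · exact le_trans h1 (by omega)
      · exact h3 m' hm' hne

-- B's scan, characterised
theorem pvScan_eq_none_iff (tl : List Char) (ms : List (List Char)) :
    ∀ (fuel i : Nat), pvScan tl ms i fuel = none ↔ ∀ k, i ≤ k → k < i + fuel → pvAnyAt tl ms k = false := by
  intro fuel
  induction fuel with
  | zero => intro i; simp [pvScan]; omega
  | succ f ih =>
    intro i
    simp only [pvScan]
    by_cases h : pvAnyAt tl ms i = true
    · rw [if_pos h]
      constructor
      · intro hc; exact absurd hc (by simp)
      · intro hall; exact absurd (hall i le_rfl (by omega)) (by simp [h])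
    · rw [if_neg h]
      rw [ih (i+1)]
      constructor
      · intro hall k hk1 hk2
        rcases Nat.eq_or_lt_of_le hk1 with rfl | hlt
        · exact eq_false_of_ne_true h
        · exact hall k hlt (by omega)
      · intro hall k hk1 hk2; exact hall k (by omega) (by omega)

theorem pvScan_eq_some_iff (tl : List Char) (ms : List (List Char)) :
    ∀ (fuel i j : Nat), pvScan tl ms i fuel = some j ↔
      (i ≤ j ∧ j < i + fuel ∧ pvAnyAt tl ms j = true ∧ ∀ k, i ≤ k → k < j → pvAnyAt tl ms k = false) := by
  intro fuel
  induction fuel with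
  | zero => intro i j; simp [pvScan]; omega
  | succ f ih =>
    intro i j
    simp only [pvScan]
    by_cases h : pvAnyAt tl ms i = true
    · rw [if_pos h]
      constructor
      · rintro h'; injection h' with h'; subst h'
        exact ⟨le_rfl, by omega, h, fun k hk1 hk2 => by omega⟩
      · rintro ⟨h1, h2, h3, h4⟩
        rcases Nat.eq_or_lt_of_le h1 with rfl | hlt
        · rfl
        · exact absurd (h4 i le_rfl hlt) (by simp [h])
    · rw [if_neg h]
      rw [ih (i+1)]
      constructor
      · rintro ⟨h1, h2, h3, h4⟩
        refine ⟨by omega, by omega, h3, ?_⟩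
        intro k hk1 hk2
        rcases Nat.eq_or_lt_of_le hk1 with rfl | hlt
        · exact eq_false_of_ne_true h
        · exact h4 k hlt hk2
      · rintro ⟨h1, h2, h3, h4⟩
        have hij : i ≠ j := by rintro rfl; exact absurd h3 (by simp [h])
        exact ⟨by omega, by omega, h3, fun k hk1 hk2 => h4 k (by omega) hk2⟩

-- pvAnyAt unfolded to an existential
theorem pvAnyAt_iff (tl : List Char) (ms : List (List Char)) (i : Nat) :
    pvAnyAt tl ms i = true ↔ ∃ m ∈ ms, m <+: tl.drop i := by
  simp [pvAnyAt, PySem.Chars.startswith_iff]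

-- findFrom past the end of the string is -1 (for a nonempty needle)
theorem pvFindFrom_ge_len (tl m : List Char) (k : Int) (hk : (tl.length : Int) ≤ k) (hm : m ≠ []) :
    PySem.Chars.findFrom tl m k = -1 := by
  have h0 : (0:Int) ≤ k := le_trans (by positivity) hk
  rcases lt_or_eq_of_le hk with hlt | heq
  · simp only [PySem.Chars.findFrom]
    split_ifs <;> first | rfl | omega
  · rw [← heq]
    rw [show ((tl.length : Int)) = ((tl.length : Nat) : Int) from rfl]
    rw [PySem.Chars.findFrom_natCast_eq_neg_one_iff tl m tl.length le_rfl]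
    simp [hm]

-- a nonempty prefix at position j forces j < length
theorem pvPrefixLt (tl m : List Char) (j : Nat) (hm : m ≠ []) (h : m <+: tl.drop j) : j < tl.length := by
  by_contra hc
  rw [List.drop_eq_nil_of_le (by omega)] at h
  exact hm (List.prefix_nil.mp h)

-- all markers are nonempty
theorem pvStartMarkers_ne_nil : ∀ m ∈ pvStartMarkers, m ≠ [] := by decide
theorem pvEndMarkers_ne_nil : ∀ m ∈ pvEndMarkers, m ≠ [] := by decide

-- ===== main bridge lemmas: fold value = scan value =====

-- START SIDE. Let r be A's fold over `find`; then:
theorem pvStart_bridge (tl : List Char) :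
    (pvStartMarkers.foldl
      (fun sp m =>
        let pos := PySem.Chars.find tl m
        if pos ≠ -1 ∧ pos < sp then pos else sp) (tl.length : Int)) =
    (((pvScan tl pvStartMarkers 0 tl.length).getD tl.length : Nat) : Int) := by
  obtain ⟨h1, h2, h3⟩ := pvFoldMinSpec (fun m => PySem.Chars.find tl m) pvStartMarkers (tl.length : Int)
  set r := pvStartMarkers.foldl
      (fun sp m =>
        let pos := PySem.Chars.find tl m
        if pos ≠ -1 ∧ pos < sp then pos else sp) (tl.length : Int) with hr
  by_cases hocc : ∃ m ∈ pvStartMarkers, ∃ j, m <+: tl.drop j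
  · -- some marker occurs: r = least occurrence position, scan finds it
    obtain ⟨m0, hm0, j0, hj0⟩ := hocc
    have hfind0 : PySem.Chars.find tl m0 ≠ -1 := by
      rw [PySem.Chars.find_ne_neg_one_iff]
      exact pvPrefixDropInfix tl m0 j0 hj0
    have hrle : r ≤ PySem.Chars.find tl m0 := h3 m0 hm0 hfind0
    -- r = f m for some m with f m ≠ -1
    have hrf : ∃ m ∈ pvStartMarkers, r = PySem.Chars.find tl m ∧ PySem.Chars.find tl m ≠ -1 := by
      rcases h2 with h2 | h2
      · exfalso
        have := PySem.Chars.find_le_length tl m0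
        have hne : PySem.Chars.find tl m0 ≥ 0 := by
          have := PySem.Chars.neg_one_le_find tl m0; omega
        have hpref := (PySem.Chars.find_spec (s := tl) (sub := m0) hne).1
        have := pvPrefixLt tl m0 (PySem.Chars.find tl m0).toNat (pvStartMarkers_ne_nil m0 hm0) hpref
        omega
      · exact h2
    obtain ⟨m1, hm1, hrm1, hne1⟩ := hrf
    have hr0 : 0 ≤ r := by
      have := PySem.Chars.neg_one_le_find tl m1; omega
    have hpref1 := (PySem.Chars.find_spec (s := tl) (sub := m1) (by omega)).1
    have hrlt : r.toNat < tl.length := by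
      have := pvPrefixLt tl m1 (PySem.Chars.find tl m1).toNat (pvStartMarkers_ne_nil m1 hm1) hpref1
      omega
    have hscan : pvScan tl pvStartMarkers 0 tl.length = some r.toNat := by
      rw [pvScan_eq_some_iff]
      refine ⟨Nat.zero_le _, by omega, ?_, ?_⟩
      · rw [pvAnyAt_iff]
        exact ⟨m1, hm1, by rw [hrm1]; exact hpref1⟩
      · intro k _ hk
        rw [Bool.eq_false_iff]
        intro hany
        rw [pvAnyAt_iff] at hany
        obtain ⟨m2, hm2, hpk⟩ := hany
        have hne2 : PySem.Chars.find tl m2 ≠ -1 := by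
          rw [PySem.Chars.find_ne_neg_one_iff]
          exact pvPrefixDropInfix tl m2 k hpk
        have hge0 : 0 ≤ PySem.Chars.find tl m2 := by
          have := PySem.Chars.neg_one_le_find tl m2; omega
        have hmin := (PySem.Chars.find_spec (s := tl) (sub := m2) hge0).2
        have hle : (PySem.Chars.find tl m2).toNat ≤ k := by
          by_contra hc
          exact hmin k (by omega) hpk
        have := h3 m2 hm2 hne2
        omega
    rw [hscan, Option.getD_some]
    omega
  · -- no marker occurs: r = len, scan = none
    push_neg at hocc
    have hall : ∀ m ∈ pvStartMarkers, PySem.Chars.find tl m = -1 := by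
      intro m hm
      rw [PySem.Chars.find_eq_neg_one_iff]
      intro hinf
      obtain ⟨j, hj⟩ := (PySem.Chars.exists_prefix_drop_iff_isIn m tl).mpr
        ((PySem.Chars.isIn_iff_infix m tl).mpr hinf)
      exact hocc m hm j hj
    have hreq : r = (tl.length : Int) := by
      rcases h2 with h2 | ⟨m, hm, _, hne⟩
      · exact h2
      · exact absurd (hall m hm) hne
    have hscan : pvScan tl pvStartMarkers 0 tl.length = none := by
      rw [pvScan_eq_none_iff]
      intro k _ _
      rw [Bool.eq_false_iff]
      intro hany
      rw [pvAnyAt_iff] at hany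
      obtain ⟨m, hm, hp⟩ := hany
      exact hocc m hm k hp
    rw [hscan, hreq, Option.getD_none]

-- END SIDE. For ss : Nat, A's fold over `findFrom … ss` equals B's bounded scan from ss.
theorem pvEnd_bridge (tl : List Char) (ss : Nat) :
    (pvEndMarkers.foldl
      (fun ep m =>
        let pos := PySem.Chars.findFrom tl m (ss : Int)
        if pos ≠ -1 ∧ pos < ep then pos else ep) (tl.length : Int)) =
    (((pvScan tl pvEndMarkers ss (tl.length - ss)).getD tl.length : Nat) : Int) := by
  obtain ⟨h1, h2, h3⟩ := pvFoldMinSpec (fun m => PySem.Chars.findFrom tl m (ss : Int)) pvEndMarkers (tl.length : Int)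
  set r := pvEndMarkers.foldl
      (fun ep m =>
        let pos := PySem.Chars.findFrom tl m (ss : Int)
        if pos ≠ -1 ∧ pos < ep then pos else ep) (tl.length : Int) with hr
  by_cases hss : tl.length ≤ ss
  · -- scan window empty; all findFrom are -1
    have hall : ∀ m ∈ pvEndMarkers, PySem.Chars.findFrom tl m (ss : Int) = -1 := fun m hm =>
      pvFindFrom_ge_len tl m (ss : Int) (by exact_mod_cast hss) (pvEndMarkers_ne_nil m hm)
    have hreq : r = (tl.length : Int) := by
      rcases h2 with h2 | ⟨m, hm, _, hne⟩
      · exact h2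
      · exact absurd (hall m hm) hne
    have : tl.length - ss = 0 := by omega
    rw [this]
    simp [pvScan, hreq]
  · push_neg at hss
    have hssle : ss ≤ tl.length := le_of_lt hss
    by_cases hocc : ∃ m ∈ pvEndMarkers, ∃ j, ss ≤ j ∧ m <+: tl.drop j
    · obtain ⟨m0, hm0, j0, hj0ss, hj0⟩ := hocc
      have hinf0 : m0 <:+: tl.drop ss := by
        refine pvPrefixDropInfix (tl.drop ss) m0 (j0 - ss) ?_
        rw [List.drop_drop]
        rw [show ss + (j0 - ss) = j0 by omega]
        exact hj0
      have hfind0 : PySem.Chars.findFrom tl m0 (ss : Int) ≠ -1 := by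
        rw [ne_eq, PySem.Chars.findFrom_natCast_eq_neg_one_iff tl m0 ss hssle]
        simpa using hinf0
      have hrle : r ≤ PySem.Chars.findFrom tl m0 (ss : Int) := h3 m0 hm0 hfind0
      have hrf : ∃ m ∈ pvEndMarkers, r = PySem.Chars.findFrom tl m (ss : Int) ∧ PySem.Chars.findFrom tl m (ss : Int) ≠ -1 := by
        rcases h2 with h2 | h2
        · exfalso
          obtain ⟨hge, hpref, _⟩ := PySem.Chars.findFrom_natCast_spec tl m0 ss hssle hfind0
          have := pvPrefixLt tl m0 (PySem.Chars.findFrom tl m0 (ss:Int)).toNat (pvEndMarkers_ne_nil m0 hm0) hpref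
          omega
        · exact h2
      obtain ⟨m1, hm1, hrm1, hne1⟩ := hrf
      obtain ⟨hge1, hpref1, hmin1⟩ := PySem.Chars.findFrom_natCast_spec tl m1 ss hssle hne1
      have hr0 : (ss : Int) ≤ r := by omega
      have hrlt : r.toNat < tl.length := by
        rw [hrm1]
        exact pvPrefixLt tl m1 (PySem.Chars.findFrom tl m1 (ss:Int)).toNat (pvEndMarkers_ne_nil m1 hm1) hpref1
      have hscan : pvScan tl pvEndMarkers ss (tl.length - ss) = some r.toNat := by
        rw [pvScan_eq_some_iff]
        refine ⟨by omega, by omega, ?_, ?_⟩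
        · rw [pvAnyAt_iff]
          exact ⟨m1, hm1, by rw [hrm1]; exact hpref1⟩
        · intro k hk1 hk2
          rw [Bool.eq_false_iff]
          intro hany
          rw [pvAnyAt_iff] at hany
          obtain ⟨m2, hm2, hpk⟩ := hany
          have hinf2 : m2 <:+: tl.drop ss := by
            refine pvPrefixDropInfix (tl.drop ss) m2 (k - ss) ?_
            rw [List.drop_drop, show ss + (k - ss) = k by omega]
            exact hpk
          have hne2 : PySem.Chars.findFrom tl m2 (ss : Int) ≠ -1 := by
            rw [ne_eq, PySem.Chars.findFrom_natCast_eq_neg_one_iff tl m2 ss hssle]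
            simpa using hinf2
          obtain ⟨hge2, _, hmin2⟩ := PySem.Chars.findFrom_natCast_spec tl m2 ss hssle hne2
          have hle : (PySem.Chars.findFrom tl m2 (ss:Int)).toNat ≤ k := by
            by_contra hc
            exact hmin2 k hk1 (by omega) hpk
          have := h3 m2 hm2 hne2
          omega
      rw [hscan]
      simp only [Option.getD_some]
      omega
    · push_neg at hocc
      have hall : ∀ m ∈ pvEndMarkers, PySem.Chars.findFrom tl m (ss : Int) = -1 := by
        intro m hm
        rw [PySem.Chars.findFrom_natCast_eq_neg_one_iff tl m ss hssle]
        intro hinf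
        obtain ⟨j, hj⟩ := (PySem.Chars.exists_prefix_drop_iff_isIn m (tl.drop ss)).mpr
          ((PySem.Chars.isIn_iff_infix m (tl.drop ss)).mpr hinf)
        rw [List.drop_drop] at hj
        exact hocc m hm (ss + j) (by omega) hj
      have hreq : r = (tl.length : Int) := by
        rcases h2 with h2 | ⟨m, hm, _, hne⟩
        · exact h2
        · exact absurd (hall m hm) hne
      have hscan : pvScan tl pvEndMarkers ss (tl.length - ss) = none := by
        rw [pvScan_eq_none_iff]
        intro k hk1 _
        rw [Bool.eq_false_iff]
        intro hany
        rw [pvAnyAt_iff] at hany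
        obtain ⟨m, hm, hp⟩ := hany
        exact hocc m hm k hk1 hp
      rw [hscan, hreq]
      simp

-- ===== VERDICT (by name: the statement is the Claim_ definition above) =====
theorem extract_mda_section_spec : Claim_equal_extract_mda_section := by
  intro text _
  unfold Spec_extract_mda_section extract_mda_section extract_mda_section_alt
  by_cases hnil : text.toList = []
  · rw [if_pos hnil, if_pos hnil]
  · rw [if_neg hnil, if_neg hnil]
    have hlen : (PySem.Chars.lower text.toList).length = text.toList.length := by
      simp [PySem.Chars.lower]
    have hstart := pvStart_bridge (PySem.Chars.lower text.toList)
    rw [hlen] at hstart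
    cases hscan : pvScan (PySem.Chars.lower text.toList) pvStartMarkers 0 text.toList.length with
    | none =>
      rw [hscan, Option.getD_none] at hstart
      rw [if_pos hstart]
    | some sp =>
      rw [hscan, Option.getD_some] at hstart
      have hsplt : sp < text.toList.length := by
        rw [pvScan_eq_some_iff] at hscan
        omega
      rw [if_neg (by rw [hstart]; intro hc; exact absurd (Int.ofNat_inj.mp hc) (by omega))]
      have hend := pvEnd_bridge (PySem.Chars.lower text.toList) (sp + 1000)
      rw [hlen] at hend
      rw [hstart]
      rw [show ((sp : Int) + 1000) = (((sp + 1000 : Nat) : Nat) : Int) by push_cast; ring]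
      rw [hend]
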